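-- pv_equiv track=rewrite | github.com/aimardcr/reAVS | core/bytecode/smali.py | find_method_calls
-- ===== SOURCE A (Python) =====
-- from typing import List, Optional, Tuple
--
-- def find_method_calls(invoked: List[str], fragments: List[str]) -> List[str]:
--     matches: List[str] = []
--     for call in invoked:
--         for frag in fragments:
--             if frag in call:
--                 matches.append(call)
--                 break
--     return matches
-- ===== SOURCE B (Python) =====
-- from typing import List
--
-- def find_method_calls(invoked: List[str], fragments: List[str]) -> List[str]:
--     matched = set()
--     remaining = list(invoked)
--     for frag in fragments:
--         unmatched = []
--         for call in remaining:
--             if frag in call: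
--                 matched.add(call)
--             else:
--                 unmatched.append(call)
--         remaining = unmatched
--     return [call for call in invoked if call in matched]
-- ===== Notes on version B (the rewrite author's own statement) =====
-- stated objective: alternative
-- what changed: Inverted the loop nesting: B iterates fragments once over a shrinking worklist of still-unmatched calls, collecting matches into a set, then restores input order by filtering invoked through set membership, instead of A's per-call scan over fragments with accumulator and break.
import Mathlib
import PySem

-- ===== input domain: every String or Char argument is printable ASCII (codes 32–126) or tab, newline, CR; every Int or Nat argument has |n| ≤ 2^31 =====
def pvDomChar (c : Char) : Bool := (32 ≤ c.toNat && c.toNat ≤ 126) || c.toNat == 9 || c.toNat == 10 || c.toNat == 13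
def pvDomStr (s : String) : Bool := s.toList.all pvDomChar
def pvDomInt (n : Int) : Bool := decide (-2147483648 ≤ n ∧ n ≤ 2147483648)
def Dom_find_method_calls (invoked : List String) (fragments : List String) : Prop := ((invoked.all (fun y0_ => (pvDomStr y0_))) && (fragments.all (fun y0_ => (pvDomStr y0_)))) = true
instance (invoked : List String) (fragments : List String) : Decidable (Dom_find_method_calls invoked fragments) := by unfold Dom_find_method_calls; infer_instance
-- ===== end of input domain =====

-- B inverts the loop nesting: it iterates fragments once, collecting every matching call into a
-- set, then filters invoked by membership in that set; alternative structure, no speed claim.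

-- ===== PORT A =====
-- inner 'for frag in fragments: if frag in call: …; break' — true iff some fragment hits
def findFragA (call : String) : List String → Bool
  | [] => false
  | frag :: rest => if PySem.Str.isIn frag call then true else findFragA call rest

def find_method_calls (invoked : List String) (fragments : List String) : List String :=
  invoked.foldl (fun acc call => if findFragA call fragments then acc ++ [call] else acc) []

-- ===== PORT B =====
-- Source B inner loop: for call in remaining: if frag in call: matched.add(call) else: unmatched.append(call)
def altScanFrag (frag : String) (remaining : List String) (matched : PySem.Set String) :
    PySem.Set String × List String :=
  remaining.foldl
    (fun (p : PySem.Set String × List String) call =>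
      if PySem.Str.isIn frag call then (PySem.Set.add p.1 call, p.2) else (p.1, p.2 ++ [call]))
    (matched, [])

-- Source B outer loop over fragments, threading (matched, remaining)
def altMatchedSet (invoked : List String) (fragments : List String) : PySem.Set String :=
  (fragments.foldl (fun (st : PySem.Set String × List String) frag => altScanFrag frag st.2 st.1)
    (PySem.Set.empty, invoked)).1

def find_method_calls_alt (invoked : List String) (fragments : List String) : List String :=
  invoked.filter (fun call => PySem.Set.contains (altMatchedSet invoked fragments) call)

-- ===== PRECONDITION & SPEC =====
def Spec_find_method_calls (invoked : List String) (fragments : List String) (out : List String) : Prop := out = find_method_calls_alt invoked fragments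
instance (invoked : List String) (fragments : List String) (out : List String) : Decidable (Spec_find_method_calls invoked fragments out) := by unfold Spec_find_method_calls; infer_instance

-- ===== CLAIM (what is proved, stated in full; the proofs are below) =====
def Claim_equal_find_method_calls : Prop := ∀ (invoked : List String) (fragments : List String), Dom_find_method_calls invoked fragments → Spec_find_method_calls invoked fragments (find_method_calls invoked fragments)

-- ===== LEMMAS AND PROOFS =====

lemma findFragA_eq_any (call : String) (l : List String) :
    findFragA call l = l.any (fun f => PySem.Str.isIn f call) := by
  induction l with
  | nil => rfl
  | cons f rest ih => cases h : PySem.Str.isIn f call <;> simp_all [findFragA]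

lemma altScanFrag_fst_mem (frag : String) (l : List String) (m : PySem.Set String)
    (u : List String) (y : String) :
    y ∈ (l.foldl
      (fun (p : PySem.Set String × List String) call =>
        if PySem.Str.isIn frag call then (PySem.Set.add p.1 call, p.2) else (p.1, p.2 ++ [call]))
      (m, u)).1 ↔ y ∈ m ∨ (y ∈ l ∧ PySem.Str.isIn frag y = true) := by
  induction l generalizing m u with
  | nil => simp
  | cons c rest ih =>
      by_cases h : PySem.Str.isIn frag c = true
      · simp only [List.foldl_cons, h, if_pos, ih, PySem.Set.mem_add, List.mem_cons]
        constructor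
        · rintro ((hm | rfl) | ⟨hr, hy⟩)
          · exact Or.inl hm
          · exact Or.inr ⟨Or.inl rfl, h⟩
          · exact Or.inr ⟨Or.inr hr, hy⟩
        · rintro (hm | ⟨(rfl | hr), hy⟩)
          · exact Or.inl (Or.inl hm)
          · exact Or.inl (Or.inr rfl)
          · exact Or.inr ⟨hr, hy⟩
      · simp only [List.foldl_cons, h, if_neg, Bool.false_eq_true, not_false_iff, ih,
          List.mem_cons]
        constructor
        · rintro (hm | ⟨hr, hy⟩)
          · exact Or.inl hm
          · exact Or.inr ⟨Or.inr hr, hy⟩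
        · rintro (hm | ⟨(rfl | hr), hy⟩)
          · exact Or.inl hm
          · exact absurd hy h
          · exact Or.inr ⟨hr, hy⟩

lemma altScanFrag_snd (frag : String) (l : List String) (m : PySem.Set String)
    (u : List String) :
    (l.foldl
      (fun (p : PySem.Set String × List String) call =>
        if PySem.Str.isIn frag call then (PySem.Set.add p.1 call, p.2) else (p.1, p.2 ++ [call]))
      (m, u)).2 = u ++ l.filter (fun c => !(PySem.Str.isIn frag c)) := by
  induction l generalizing m u with
  | nil => simp
  | cons c rest ih =>
      rw [List.foldl_cons, List.filter_cons]
      cases h : PySem.Str.isIn frag c <;>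
        simp only [h, Bool.false_eq_true, reduceIte] <;>
        rw [ih] <;> simp

lemma foldl_frags_fst_mem (fs : List String) (m : PySem.Set String) (r : List String)
    (y : String) :
    y ∈ (fs.foldl (fun (st : PySem.Set String × List String) frag => altScanFrag frag st.2 st.1)
        (m, r)).1 ↔ y ∈ m ∨ (y ∈ r ∧ ∃ f ∈ fs, PySem.Str.isIn f y = true) := by
  induction fs generalizing m r with
  | nil => simp
  | cons f rest ih =>
      rw [List.foldl_cons]
      have hstep : altScanFrag f r m =
          ((r.foldl
            (fun (p : PySem.Set String × List String) call =>
              if PySem.Str.isIn f call then (PySem.Set.add p.1 call, p.2)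
              else (p.1, p.2 ++ [call])) (m, [])).1,
           r.filter (fun c => !(PySem.Str.isIn f c))) := by
        unfold altScanFrag
        exact Prod.ext rfl (by simpa using altScanFrag_snd f r m [])
      rw [hstep, ih]
      simp only [altScanFrag_fst_mem, List.mem_filter, Bool.not_eq_eq_eq_not, Bool.not_true,
        List.mem_cons]
      constructor
      · rintro ((hm | ⟨hr, hy⟩) | ⟨⟨hr, hny⟩, g, hg, hgy⟩)
        · exact Or.inl hm
        · exact Or.inr ⟨hr, f, Or.inl rfl, hy⟩
        · exact Or.inr ⟨hr, g, Or.inr hg, hgy⟩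
      · rintro (hm | ⟨hr, g, (rfl | hg), hgy⟩)
        · exact Or.inl (Or.inl hm)
        · exact Or.inl (Or.inr ⟨hr, hgy⟩)
        · by_cases hf : PySem.Str.isIn f y = true
          · exact Or.inl (Or.inr ⟨hr, hf⟩)
          · exact Or.inr ⟨⟨hr, by simpa using hf⟩, g, hg, hgy⟩

lemma mem_altMatchedSet (invoked fragments : List String) (y : String) :
    y ∈ altMatchedSet invoked fragments ↔
      y ∈ invoked ∧ ∃ f ∈ fragments, PySem.Str.isIn f y = true := by
  unfold altMatchedSet
  rw [foldl_frags_fst_mem]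
  simp [PySem.Set.empty]

lemma contains_eq_findFragA (invoked fragments : List String) (call : String)
    (hc : call ∈ invoked) :
    PySem.Set.contains (altMatchedSet invoked fragments) call = findFragA call fragments := by
  rw [Bool.eq_iff_iff, PySem.Set.contains_iff, mem_altMatchedSet, findFragA_eq_any]
  simp only [List.any_eq_true]
  exact ⟨fun h => h.2, fun h => ⟨hc, h⟩⟩

-- ===== VERDICT (by name: the statement is the Claim_ definition above) =====
theorem find_method_calls_spec : Claim_equal_find_method_calls := by
  intro invoked fragments _
  unfold Spec_find_method_calls find_method_calls find_method_calls_alt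
  have hA := PySem.List.foldl_append_if (fun call => findFragA call fragments) (id : String → String) invoked []
  simp only [List.map_id, id] at hA
  rw [hA, List.nil_append]
  exact List.filter_congr (fun call hc => (contains_eq_findFragA invoked fragments call hc).symm)
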